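-- pv_equiv track=rewrite | github.com/EmineTekcan/TwitterScrapingProject | Search/search.py | search_tw
-- ===== SOURCE A (Python) =====
-- def search_tw(data_words,data_tw):
--     liste = []
--     count=0
--     #data_words = data_words.values.tolist()
--     #data_tw = data_tw.values.tolist()
--     for x in range(0,len(data_words)):
--         for y in range(0, len(data_tw)):
--             word = str(data_words[x]).lower().strip()
--             tweet = data_tw[y]
--             tweet = str(tweet).lower().split(" ")
--             for z in tweet:
--                 if str(z) != str(word):
--                     continue
--                 else:
--                     liste.append(data_tw[y])
--                     count+=1
--
--     return liste
-- ===== SOURCE B (Python) =====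
-- def search_tw(data_words, data_tw):
--     # Build inverted index token -> tweets (one entry per occurrence, tweet order), then one lookup per word.
--     index = {}
--     for tweet in data_tw:
--         for tok in str(tweet).lower().split(" "):
--             index.setdefault(tok, []).append(tweet)
--     result = []
--     for w in data_words:
--         result.extend(index.get(str(w).lower().strip(), []))
--     return result
-- ===== Notes on version B (the rewrite author's own statement) =====
-- stated objective: faster
-- what changed: Replaces A's triple nested loop (every word scanned against every token of every tweet) by building an inverted index token->tweet-occurrence list once over the tweets, then a single dictionary lookup per search word.
import Mathlib
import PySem

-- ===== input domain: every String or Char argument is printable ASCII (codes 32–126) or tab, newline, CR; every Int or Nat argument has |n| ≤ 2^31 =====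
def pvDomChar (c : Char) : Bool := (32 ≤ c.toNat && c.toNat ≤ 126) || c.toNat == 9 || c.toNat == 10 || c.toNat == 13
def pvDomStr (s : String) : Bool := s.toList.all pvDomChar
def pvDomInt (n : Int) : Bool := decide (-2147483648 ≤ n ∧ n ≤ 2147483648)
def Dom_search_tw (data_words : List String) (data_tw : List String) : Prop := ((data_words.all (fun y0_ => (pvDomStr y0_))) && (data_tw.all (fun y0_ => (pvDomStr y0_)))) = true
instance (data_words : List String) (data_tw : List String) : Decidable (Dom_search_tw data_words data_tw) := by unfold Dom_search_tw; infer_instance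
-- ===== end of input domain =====

-- B replaces A's word×tweet×token triple loop by an inverted index (token → tweet per occurrence)
-- built once over the tweets, then one lookup per word (objective: faster, asymptotically).

-- ===== PORT A =====
def search_tw (data_words : List String) (data_tw : List String) : List String :=
  let st :=
    (PySem.List.pyRange 0 (PySem.List.len data_words) 1).foldl
      (fun (st : List String × Int) x =>
        (PySem.List.pyRange 0 (PySem.List.len data_tw) 1).foldl
          (fun st y =>
            let word := PySem.Str.strip (PySem.Str.lower (PySem.List.pyGetD data_words x ""))
            let tweet := (PySem.Str.split? (PySem.Str.lower (PySem.List.pyGetD data_tw y "")) " ").getD []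
            tweet.foldl
              (fun st z =>
                if z ≠ word then st
                else (st.1 ++ [PySem.List.pyGetD data_tw y ""], st.2 + 1))
              st)
          st)
      (([] : List String), (0 : Int))
  st.1

-- ===== PORT B =====
-- token/tweet pairs of one tweet, in token order
def pvTokPairs (tw : String) : List (String × String) :=
  ((PySem.Str.split? (PySem.Str.lower tw) " ").getD []).map (fun tok => (tok, tw))

-- inverted index: token → tweets containing it, one entry per occurrence, tweet order
def pvIndex (data_tw : List String) : PySem.Dict String (List String) :=
  (data_tw.flatMap pvTokPairs).foldl
    (fun d p => d.modify p.1 [] (· ++ [p.2])) PySem.Dict.empty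

def search_tw_alt (data_words : List String) (data_tw : List String) : List String :=
  let idx := pvIndex data_tw
  data_words.foldl
    (fun acc w => acc ++ idx.getD (PySem.Str.strip (PySem.Str.lower w)) []) []

-- ===== PRECONDITION & SPEC =====
def Spec_search_tw (data_words : List String) (data_tw : List String) (out : List String) : Prop := out = search_tw_alt data_words data_tw
instance (data_words : List String) (data_tw : List String) (out : List String) : Decidable (Spec_search_tw data_words data_tw out) := by unfold Spec_search_tw; infer_instance

-- ===== CLAIM (what is proved, stated in full; the proofs are below) =====
def Claim_equal_search_tw : Prop := ∀ (data_words : List String) (data_tw : List String), Dom_search_tw data_words data_tw → Spec_search_tw data_words data_tw (search_tw data_words data_tw)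

-- ===== LEMMAS AND PROOFS =====

-- the occurrences a word key contributes for one tweet
def pvOcc (k : String) (tw : String) : List String :=
  (((PySem.Str.split? (PySem.Str.lower tw) " ").getD []).filter (fun z => z = k)).map (fun _ => tw)

-- A's innermost token loop, first component
theorem pv_tok_loop (l : List String) (k tw : String) (st : List String × Int) :
    (l.foldl (fun st z => if z ≠ k then st else (st.1 ++ [tw], st.2 + 1)) st).1
      = st.1 ++ (l.filter (fun z => z = k)).map (fun _ => tw) := by
  induction l generalizing st with
  | nil => simp
  | cons t rest ih =>
    simp only [List.foldl_cons]
    by_cases h : t = k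
    · rw [if_neg (by simp [h]), ih]; simp [h]
    · rw [if_pos h, ih]; simp [h]

-- A's tweet loop, first component
theorem pv_tw_loop (k : String) (tws : List String) (st : List String × Int) :
    (tws.foldl
        (fun st tw =>
          ((PySem.Str.split? (PySem.Str.lower tw) " ").getD []).foldl
            (fun st z => if z ≠ k then st else (st.1 ++ [tw], st.2 + 1)) st)
        st).1
      = st.1 ++ tws.flatMap (pvOcc k) := by
  induction tws generalizing st with
  | nil => simp
  | cons tw rest ih =>
    simp only [List.foldl_cons, ih, List.flatMap_cons, pvOcc]
    have h := pv_tok_loop ((PySem.Str.split? (PySem.Str.lower tw) " ").getD []) k tw st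
    rw [h, List.append_assoc]

-- the index lookup is exactly the per-occurrence occurrence list
theorem pv_index_getD (tws : List String) (k : String) :
    (pvIndex tws).getD k [] = tws.flatMap (pvOcc k) := by
  rw [pvIndex, PySem.Dict.getD_foldl_modify_append]
  simp only [PySem.Dict.getD_empty, List.nil_append, List.filter_flatMap, List.map_flatMap]
  refine List.flatMap_congr ?_
  intro tw _
  have hf : ∀ l : List String, l.filter (fun x => x == k) = l.filter (fun z => decide (z = k)) := by
    intro l; apply List.filter_congr; intro x _; exact beq_eq_decide x k
  simp [pvTokPairs, pvOcc, List.filter_map, List.map_map, Function.comp_def, hf]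

theorem search_tw_eq (data_words data_tw : List String) :
    search_tw data_words data_tw = search_tw_alt data_words data_tw := by
  unfold search_tw search_tw_alt
  rw [PySem.List.foldl_pyRange_zero_pyGetD data_words ""
        (fun (st : List String × Int) w =>
          (PySem.List.pyRange 0 (PySem.List.len data_tw) 1).foldl
            (fun st y =>
              let word := PySem.Str.strip (PySem.Str.lower w)
              let tweet := (PySem.Str.split? (PySem.Str.lower (PySem.List.pyGetD data_tw y "")) " ").getD []
              tweet.foldl
                (fun st z =>
                  if z ≠ word then st
                  else (st.1 ++ [PySem.List.pyGetD data_tw y ""], st.2 + 1)) st) st)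
        (([] : List String), (0 : Int))]
  simp only
  -- rewrite each inner pyRange loop into a structural loop over data_tw
  have hin : ∀ (w : String) (st : List String × Int),
      (PySem.List.pyRange 0 (PySem.List.len data_tw) 1).foldl
        (fun st y =>
          ((PySem.Str.split? (PySem.Str.lower (PySem.List.pyGetD data_tw y "")) " ").getD []).foldl
            (fun st z =>
              if z ≠ PySem.Str.strip (PySem.Str.lower w) then st
              else (st.1 ++ [PySem.List.pyGetD data_tw y ""], st.2 + 1)) st) st
      = data_tw.foldl
          (fun st tw =>
            ((PySem.Str.split? (PySem.Str.lower tw) " ").getD []).foldl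
              (fun st z =>
                if z ≠ PySem.Str.strip (PySem.Str.lower w) then st
                else (st.1 ++ [tw], st.2 + 1)) st) st := by
    intro w st
    exact PySem.List.foldl_pyRange_zero_pyGetD data_tw ""
      (fun st tw =>
        ((PySem.Str.split? (PySem.Str.lower tw) " ").getD []).foldl
          (fun st z =>
            if z ≠ PySem.Str.strip (PySem.Str.lower w) then st
            else (st.1 ++ [tw], st.2 + 1)) st) st
  -- both sides as flatMaps over data_words
  have main : ∀ (ws : List String) (st : List String × Int) (acc : List String),
      st.1 = acc →
      (ws.foldl
          (fun st w =>
            (PySem.List.pyRange 0 (PySem.List.len data_tw) 1).foldl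
              (fun st y =>
                ((PySem.Str.split? (PySem.Str.lower (PySem.List.pyGetD data_tw y "")) " ").getD []).foldl
                  (fun st z =>
                    if z ≠ PySem.Str.strip (PySem.Str.lower w) then st
                    else (st.1 ++ [PySem.List.pyGetD data_tw y ""], st.2 + 1)) st) st)
          st).1
        = ws.foldl (fun acc w => acc ++ (pvIndex data_tw).getD (PySem.Str.strip (PySem.Str.lower w)) []) acc := by
    intro ws
    induction ws with
    | nil => intro st acc h; simpa using h
    | cons w rest ih =>
      intro st acc h
      simp only [List.foldl_cons]
      apply ih
      rw [hin w st, pv_tw_loop (PySem.Str.strip (PySem.Str.lower w)) data_tw st,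
          pv_index_getD, h]
  exact main data_words _ [] rfl

-- ===== VERDICT (by name: the statement is the Claim_ definition above) =====
theorem search_tw_spec : Claim_equal_search_tw := by
  intro dw dt _
  unfold Spec_search_tw
  exact search_tw_eq dw dt
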